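-- pv_equiv track=rewrite | github.com/oofaish/news-feed-api | filters.py | is_marked_by_tag
-- ===== SOURCE A (Python) =====
-- from typing import Optional
--
-- def is_marked_by_tag(
--     article_tags, negative_tags, positive_tags
-- ) -> tuple[int, Optional[str]]:
--     if article_tags is None:
--         return 0, None
--
--     negative_tag = None
--     positive_tag = None
--     for tag in article_tags:
--         if tag in negative_tags:
--             negative_tag = tag
--         elif tag in positive_tags:
--             positive_tag = tag
--
--     if negative_tag is not None and positive_tag is None:
--         return -10, negative_tag
--
--     if positive_tag is not None and negative_tag is None:
--         return 10, positive_tag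
--
--     return 0, None
-- ===== SOURCE B (Python) =====
-- def is_marked_by_tag(article_tags, negative_tags, positive_tags):
--     if article_tags is None:
--         return 0, None
--     found_sign = 0
--     found_tag = None
--     for tag in reversed(article_tags):
--         if tag in negative_tags:
--             sign = -1
--         elif tag in positive_tags:
--             sign = 1
--         else:
--             continue
--         if found_sign == 0:
--             found_sign, found_tag = sign, tag
--         elif sign != found_sign:
--             return 0, None
--     return found_sign * 10, found_tag
-- ===== Notes on version B (the rewrite author's own statement) =====
-- stated objective: faster
-- what changed: Replaces A's full forward pass tracking two last-seen slots with an early-exit reverse scan that locks in the first match's kind and stops immediately once the verdict is decided (opposite kind seen), instead of scanning every tag.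
import Mathlib
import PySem

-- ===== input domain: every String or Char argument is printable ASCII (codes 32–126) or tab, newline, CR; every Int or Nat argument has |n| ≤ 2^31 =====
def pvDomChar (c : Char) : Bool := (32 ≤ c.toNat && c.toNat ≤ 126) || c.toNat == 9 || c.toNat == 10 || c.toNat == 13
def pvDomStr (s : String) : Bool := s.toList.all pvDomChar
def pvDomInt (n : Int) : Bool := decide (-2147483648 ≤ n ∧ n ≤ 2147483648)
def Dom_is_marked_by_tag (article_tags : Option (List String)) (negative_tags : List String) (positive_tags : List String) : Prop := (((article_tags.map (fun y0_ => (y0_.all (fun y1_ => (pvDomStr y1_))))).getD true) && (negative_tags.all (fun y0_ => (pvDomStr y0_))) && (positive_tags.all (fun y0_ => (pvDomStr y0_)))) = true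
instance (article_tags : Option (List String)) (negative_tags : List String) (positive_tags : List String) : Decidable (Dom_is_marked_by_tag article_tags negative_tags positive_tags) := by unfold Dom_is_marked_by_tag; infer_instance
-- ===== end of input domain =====

-- B replaces A's full forward pass (two last-seen slots) with an early-exit reverse scan (alternative decomposition; return value only).


-- ===== PORT A =====
-- loop: for tag in article_tags: if tag in negative_tags: negative_tag = tag elif tag in positive_tags: positive_tag = tag
def is_marked_by_tag (article_tags : Option (List String)) (negative_tags : List String) (positive_tags : List String) : Int × Option String :=
  match article_tags with
  | none => (0, none)
  | some tags =>
    let st := tags.foldl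
      (fun (s : Option String × Option String) tag =>
        if negative_tags.contains tag then (some tag, s.2)
        else if positive_tags.contains tag then (s.1, some tag)
        else s)
      (none, none)
    if st.1.isSome && st.2.isNone then (-10, st.1)
    else if st.2.isSome && st.1.isNone then (10, st.2)
    else (0, none)

-- ===== PORT B =====
-- B's loop over reversed(article_tags) with its two early exits (`continue` and `return 0, None`)
def scanRev (N P : List String) : List String → Int → Option String → Int × Option String
  | [], fs, ft => (fs * 10, ft)
  | t :: rest, fs, ft =>
    let sign : Int := if N.contains t then -1 else if P.contains t then 1 else 0
    if sign = 0 then scanRev N P rest fs ft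
    else if fs = 0 then scanRev N P rest sign (some t)
    else if sign ≠ fs then (0, none)
    else scanRev N P rest fs ft

def is_marked_by_tag_alt (article_tags : Option (List String)) (negative_tags : List String) (positive_tags : List String) : Int × Option String :=
  match article_tags with
  | none => (0, none)
  | some tags => scanRev negative_tags positive_tags tags.reverse 0 none

-- ===== PRECONDITION & SPEC =====
def Spec_is_marked_by_tag (article_tags : Option (List String)) (negative_tags : List String) (positive_tags : List String) (out : Int × Option String) : Prop := out = is_marked_by_tag_alt article_tags negative_tags positive_tags
instance (article_tags : Option (List String)) (negative_tags : List String) (positive_tags : List String) (out : Int × Option String) : Decidable (Spec_is_marked_by_tag article_tags negative_tags positive_tags out) := by unfold Spec_is_marked_by_tag; infer_instance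

-- ===== CLAIM (what is proved, stated in full; the proofs are below) =====
def Claim_equal_is_marked_by_tag : Prop := ∀ (article_tags : Option (List String)) (negative_tags : List String) (positive_tags : List String), Dom_is_marked_by_tag article_tags negative_tags positive_tags → Spec_is_marked_by_tag article_tags negative_tags positive_tags (is_marked_by_tag article_tags negative_tags positive_tags)

-- ===== LEMMAS AND PROOFS =====

theorem any_eq_isSome_find? {a : Type} (p : a -> Bool) (l : List a) :
    l.any p = (l.find? p).isSome := by
  induction l with
  | nil => rfl
  | cons x t ih =>
    by_cases h : p x = true <;> simp [List.any_cons, h, ih]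

-- with a negative already locked in, the scan returns (0, none) iff a positive-not-negative tag remains
theorem scanRev_neg (N P : List String) (rl : List String) (ft : Option String) :
    scanRev N P rl (-1) ft =
      if rl.any (fun t => P.contains t && !N.contains t) then (0, none) else (-10, ft) := by
  induction rl with
  | nil => simp [scanRev]
  | cons t rest ih =>
    by_cases hN : t ∈ N
    · simp [scanRev, hN, ih]
    · by_cases hP : t ∈ P
      · simp [scanRev, hN, hP]
      · simp [scanRev, hN, hP, ih]

-- with a positive already locked in, the scan returns (0, none) iff a negative tag remains
theorem scanRev_pos (N P : List String) (rl : List String) (ft : Option String) :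
    scanRev N P rl 1 ft =
      if rl.any (fun t => N.contains t) then (0, none) else (10, ft) := by
  induction rl with
  | nil => simp [scanRev]
  | cons t rest ih =>
    by_cases hN : t ∈ N
    · simp [scanRev, hN]
    · by_cases hP : t ∈ P
      · simp [scanRev, hN, hP, ih]
      · simp [scanRev, hN, hP, ih]

-- characterisation of the whole scan from the empty state via the first match of each kind
theorem scanRev_zero (N P : List String) (rl : List String) :
    scanRev N P rl 0 none =
      (fun (a b : Option String) =>
        if a.isSome && b.isNone then (-10, a)
        else if b.isSome && a.isNone then (10, b)
        else (0, none))
      (rl.find? (fun t => N.contains t))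
      (rl.find? (fun t => P.contains t && !N.contains t)) := by
  induction rl with
  | nil => simp [scanRev]
  | cons t rest ih =>
    by_cases hN : t ∈ N
    · rw [show scanRev N P (t :: rest) 0 none = scanRev N P rest (-1) (some t) by
        simp [scanRev, hN]]
      rw [scanRev_neg, any_eq_isSome_find?]
      cases hf : rest.find? (fun t => P.contains t && !N.contains t) with
      | none =>
        simp [List.find?_cons, hN, hf]
        intro x hx hxp
        have hx' := List.find?_eq_none.mp hf x hx
        simpa [hxp] using hx'
      | some v =>
        simp [List.find?_cons, hN, hf]
        have h1 := List.find?_some hf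
        have h2 := List.mem_of_find?_eq_some hf
        simp at h1
        exact ⟨v, h2, h1.1, h1.2⟩
    · by_cases hP : t ∈ P
      · rw [show scanRev N P (t :: rest) 0 none = scanRev N P rest 1 (some t) by
          simp [scanRev, hN, hP]]
        rw [scanRev_pos, any_eq_isSome_find?]
        cases hf : rest.find? (fun t => N.contains t) with
        | none =>
          simp [List.find?_cons, hN, hP, hf]
          intro x hx
          have hx' := List.find?_eq_none.mp hf x hx
          simpa using hx'
        | some v =>
          simp [List.find?_cons, hN, hP, hf]
          have h1 := List.find?_some hf
          have h2 := List.mem_of_find?_eq_some hf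
          simp at h1
          exact ⟨v, h2, h1⟩
      · rw [show scanRev N P (t :: rest) 0 none = scanRev N P rest 0 none by
          simp [scanRev, hN, hP]]
        simp [ih, List.find?_cons, hN, hP]

-- first match in the reversed list = last match in the original list, via filter
theorem head?_filter_eq_find? {a : Type} (p : a -> Bool) (l : List a) :
    (l.filter p).head? = l.find? p := by
  induction l with
  | nil => rfl
  | cons x t ih => by_cases h : p x = true <;> simp [List.filter_cons, List.find?_cons, h, ih]

theorem getLast?_filter_eq_find?_reverse {a : Type} (p : a -> Bool) (l : List a) :
    (l.filter p).getLast? = l.reverse.find? p := by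
  rw [← head?_filter_eq_find?, ← List.head?_reverse, List.filter_reverse]

theorem getLast?_cons_or {a : Type} (x : a) (l : List a) :
    (x :: l).getLast? = l.getLast?.or (some x) := by
  cases l with
  | nil => rfl
  | cons b t =>
    rw [List.getLast?_cons_cons]
    cases h : (b :: t).getLast? with
    | none => simp at h
    | some y => simp [Option.or]

-- invariant of A's loop: the accumulator components are the last matching elements, seeded by the start state
theorem fold_eq_filters (N P : List String) (tags : List String) :
    ∀ (n0 p0 : Option String),
      tags.foldl
        (fun (s : Option String × Option String) tag =>
          if N.contains tag then (some tag, s.2)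
          else if P.contains tag then (s.1, some tag)
          else s)
        (n0, p0)
      = ((tags.filter (fun t => N.contains t)).getLast?.or n0,
         (tags.filter (fun t => P.contains t && !N.contains t)).getLast?.or p0) := by
  induction tags with
  | nil => intro n0 p0; rfl
  | cons t rest ih =>
    intro n0 p0
    rw [List.foldl_cons, List.filter_cons, List.filter_cons]
    by_cases hN : N.contains t = true
    · rw [if_pos hN, ih, if_pos hN]
      rw [show (P.contains t && !N.contains t) = false by rw [hN]; simp]
      rw [if_neg (by simp), getLast?_cons_or, Option.or_assoc]
      simp [Option.some_or]
    · rw [if_neg hN]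
      have hN' : N.contains t = false := Bool.eq_false_iff.mpr hN
      rw [show (P.contains t && !N.contains t) = P.contains t by rw [hN']; simp]
      by_cases hP : P.contains t = true
      · rw [if_pos hP, ih, if_neg hN, if_pos hP, getLast?_cons_or, Option.or_assoc]
        simp [Option.some_or]
      · rw [if_neg hP, ih, if_neg hN, if_neg hP]

-- ===== VERDICT (by name: the statement is the Claim_ definition above) =====
theorem is_marked_by_tag_spec : Claim_equal_is_marked_by_tag := by
  intro article_tags N P _
  unfold Spec_is_marked_by_tag is_marked_by_tag is_marked_by_tag_alt
  cases article_tags with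
  | none => rfl
  | some tags =>
    simp only [fold_eq_filters, Option.or_none, scanRev_zero,
      getLast?_filter_eq_find?_reverse]
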